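-- pv_equiv track=rewrite | github.com/kuikuang/IPLoM | IPLoM.py | getCount1
-- ===== SOURCE A (Python) =====
-- def getCount1(list):                                                         #获得每个位置只有一个值的position的个数
--     count=0
--     judge=True
--     l=len(list[0])
--     m=len(list)
--     if m==1 :
--         return l
--     for i in range(l):
--         for j in range(m-1):
--             if list[j][i]!=list[j+1][i]:
--                 judge=False
--         if judge:
--             count+=1
--         else:
--             judge=True
--     return count
-- ===== SOURCE B (Python) =====
-- def getCount1(list):
--     first = list[0]
--     mask = [True] * len(first)
--     for row in list[1:]:
--         mask = [ok and row[i] == first[i] for i, ok in enumerate(mask)]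
--     return sum(mask)
-- ===== Notes on version B (the rewrite author's own statement) =====
-- stated objective: alternative
-- what changed: Row-major single pass maintaining a per-column boolean mask intersected against the first row, instead of A's column-major double loop with an adjacent-pair flag and an m==1 special case.
import Mathlib
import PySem

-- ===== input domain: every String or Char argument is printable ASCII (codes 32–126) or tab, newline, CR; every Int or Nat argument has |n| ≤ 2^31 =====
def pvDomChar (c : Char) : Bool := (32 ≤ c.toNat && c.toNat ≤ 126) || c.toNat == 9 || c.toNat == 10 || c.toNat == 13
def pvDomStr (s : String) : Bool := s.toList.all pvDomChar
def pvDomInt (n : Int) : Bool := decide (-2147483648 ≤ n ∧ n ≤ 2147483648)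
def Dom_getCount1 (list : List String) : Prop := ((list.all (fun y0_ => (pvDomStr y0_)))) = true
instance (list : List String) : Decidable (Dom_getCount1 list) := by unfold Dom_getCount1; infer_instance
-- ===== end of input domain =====

-- B makes one row-major pass keeping a per-column boolean mask intersected against the
-- first row, instead of A's column-major double loop with an adjacent-pair flag and an
-- m==1 special case; same asymptotic cost (objective: alternative).

-- ===== PORT A =====
def getCount1 (list : List String) : Int :=
  let l : Int := ((list.headD "").toList.length : Int)
  let m : Int := (list.length : Int)
  if m = 1 then l
  else
    ((PySem.List.pyRange 0 l 1).foldl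
      (fun (st : Int × Bool) i =>
        let judge := (PySem.List.pyRange 0 (m - 1) 1).foldl
          (fun judge j =>
            if PySem.Str.pyGet? (PySem.List.pyGetD list j "") i ≠
               PySem.Str.pyGet? (PySem.List.pyGetD list (j + 1) "") i then false else judge)
          st.2
        if judge then (st.1 + 1, judge) else (st.1, true))
      (0, true)).1

-- ===== PORT B =====
-- the body of B's list comprehension: mask = [ok and row[i] == first[i] for i, ok in enumerate(mask)]
def pvStep (first : String) (mask : List Bool) (row : String) : List Bool :=
  (PySem.List.enumerate mask).map
    (fun p => p.2 && decide (PySem.Str.pyGet? row p.1 = PySem.Str.pyGet? first p.1))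

def getCount1_alt (list : List String) : Int :=
  let first := list.headD ""
  let mask := (PySem.List.slice list (some 1) none).foldl (pvStep first)
    (List.replicate first.toList.length true)
  (mask.countP id : Int)

-- ===== PRECONDITION & SPEC =====
-- Pre_ excludes exactly the inputs where the Python A raises IndexError: the empty list
-- (list[0]) and ragged input where some row is shorter than row 0 (list[j][i]).
def Pre_getCount1 (list : List String) : Prop :=
  list ≠ [] ∧ ∀ s ∈ list, (list.headD "").toList.length ≤ s.toList.length
instance (list : List String) : Decidable (Pre_getCount1 list) := by
  unfold Pre_getCount1; infer_instance
def pvWitness_getCount1 : List String := ["abc", "abd"]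

def Spec_getCount1 (list : List String) (out : Int) : Prop := out = getCount1_alt list
instance (list : List String) (out : Int) : Decidable (Spec_getCount1 list out) := by
  unfold Spec_getCount1; infer_instance

-- ===== CLAIM (what is proved, stated in full; the proofs are below) =====
def Claim_equal_getCount1 : Prop :=
  ∀ (list : List String), Dom_getCount1 list → Pre_getCount1 list →
    Spec_getCount1 list (getCount1 list)

-- ===== LEMMAS AND PROOFS =====

-- folding "if P j then false else acc" from false stays false
theorem pv_foldl_false {b : Type} (P : b → Prop) [DecidablePred P] :
    ∀ (is : List b), is.foldl (fun a j => if P j then false else a) false = false := by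
  intro is
  induction is with
  | nil => rfl
  | cons i is ih => simp only [List.foldl_cons, ite_self]; exact ih

-- folding "if P j then false else acc" computes acc && all ¬P
theorem pv_foldl_if_false {b : Type} (P : b → Prop) [DecidablePred P] :
    ∀ (is : List b) (acc : Bool),
      is.foldl (fun a j => if P j then false else a) acc
        = (acc && is.all fun j => !decide (P j)) := by
  intro is
  induction is with
  | nil => intro acc; simp
  | cons i is ih =>
    intro acc
    simp only [List.foldl_cons, List.all_cons]
    by_cases h : P i
    · rw [if_pos h, pv_foldl_false P is, decide_eq_true h]; simp
    · rw [if_neg h, ih, decide_eq_false h]; simp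

-- the outer loop of A: judge is true at the start of every iteration, so the fold
-- counts the indices whose inner fold from true yields true
theorem pv_outer (G : Bool → Int → Bool) :
    ∀ (is : List Int) (c : Int),
      is.foldl (fun (st : Int × Bool) i =>
          if G st.2 i then (st.1 + 1, G st.2 i) else (st.1, true)) (c, true)
        = (c + (is.countP (fun i => G true i) : Int), true) := by
  intro is
  induction is with
  | nil => intro c; simp
  | cons i is ih =>
    intro c
    simp only [List.foldl_cons]
    by_cases h : G true i = true
    · rw [if_pos h, h, ih, List.countP_cons]
      simp only [h, if_pos, Prod.mk.injEq, and_true]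
      push_cast; ring
    · have h' : G true i = false := by simpa using h
      rw [h', if_neg (by simp), ih, List.countP_cons]
      simp only [h', Prod.mk.injEq, and_true]
      push_cast; ring

-- adjacent equality along the rows iff every row's char agrees with the head's
theorem pv_adj_iff (r : String) (rs : List String) (i : Int) :
    (∀ k, k < rs.length →
        PySem.Str.pyGet? ((r :: rs).getD k "") i
          = PySem.Str.pyGet? ((r :: rs).getD (k + 1) "") i)
      ↔ ∀ s ∈ r :: rs, PySem.Str.pyGet? s i = PySem.Str.pyGet? r i := by
  constructor
  · intro h s hs
    have key : ∀ k, k < (r :: rs).length →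
        PySem.Str.pyGet? ((r :: rs).getD k "") i = PySem.Str.pyGet? r i := by
      intro k
      induction k with
      | zero => intro _; rfl
      | succ k ihk =>
        intro hk
        have hk' : k < rs.length := by simp at hk; omega
        rw [← h k hk']
        exact ihk (by simp; omega)
    obtain ⟨k, hk, rfl⟩ := List.mem_iff_getElem.mp hs
    rw [← List.getD_eq_getElem (r :: rs) "" hk]
    exact key k hk
  · intro h k hk
    have h1 : k < (r :: rs).length := by simp; omega
    have h2 : k + 1 < (r :: rs).length := by simp; omega
    rw [List.getD_eq_getElem (r :: rs) "" h1, List.getD_eq_getElem (r :: rs) "" h2,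
      h _ (List.getElem_mem h1), h _ (List.getElem_mem h2)]

-- the inner fold of A decides "every row agrees with the head at column i"
theorem pv_col (r : String) (rs : List String) (i : Int) :
    ((PySem.List.pyRange 0 ((rs.length : Int)) 1).foldl
        (fun judge j =>
          if PySem.Str.pyGet? (PySem.List.pyGetD (r :: rs) j "") i ≠
             PySem.Str.pyGet? (PySem.List.pyGetD (r :: rs) (j + 1) "") i
          then false else judge) true)
      = decide (∀ s ∈ r :: rs, PySem.Str.pyGet? s i = PySem.Str.pyGet? r i) := by
  rw [pv_foldl_if_false
    (fun j => PySem.Str.pyGet? (PySem.List.pyGetD (r :: rs) j "") i ≠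
              PySem.Str.pyGet? (PySem.List.pyGetD (r :: rs) (j + 1) "") i)]
  rw [Bool.true_and, PySem.List.pyRange_zero_natCast, List.all_map]
  rw [Bool.eq_iff_iff]
  simp only [List.all_eq_true, List.mem_range, Function.comp,
    Bool.not_eq_true', decide_eq_false_iff_not, not_not, decide_eq_true_eq]
  have cast1 : ∀ k : Nat, ((k : Int) + 1) = ((k + 1 : Nat) : Int) := by
    intro k; push_cast; ring
  constructor
  · intro h
    refine (pv_adj_iff r rs i).mp ?_
    intro k hk
    have hh := h k hk
    rwa [PySem.List.pyGetD_natCast, cast1 k, PySem.List.pyGetD_natCast] at hh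
  · intro h k hk
    rw [PySem.List.pyGetD_natCast, cast1 k, PySem.List.pyGetD_natCast]
    exact (pv_adj_iff r rs i).mpr h k hk

-- one comprehension step: length preserved
theorem pvStep_length (f : String) (m : List Bool) (row : String) :
    (pvStep f m row).length = m.length := by
  simp [pvStep, PySem.List.length_enumerate]

-- one comprehension step, element by element
theorem pvStep_getElem? (f : String) (m : List Bool) (row : String) (k : Nat)
    (h : k < m.length) :
    (pvStep f m row)[k]? =
      some (m[k] && decide (PySem.Str.pyGet? row (k : Int)
                              = PySem.Str.pyGet? f (k : Int))) := by
  simp [pvStep, PySem.List.getElem?_enumerate, List.getElem?_eq_getElem h]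

-- length is preserved across the whole row fold
theorem pv_mask_len (f : String) :
    ∀ (rows : List String) (m : List Bool),
      (rows.foldl (pvStep f) m).length = m.length := by
  intro rows
  induction rows with
  | nil => intro m; rfl
  | cons row rows ih => intro m; rw [List.foldl_cons, ih, pvStep_length]

-- the mask after folding all rows, element by element
theorem pv_mask_fold (f : String) :
    ∀ (rows : List String) (m : List Bool) (k : Nat) (h : k < m.length),
      (rows.foldl (pvStep f) m)[k]? =
        some (m[k] && rows.all (fun row =>
          decide (PySem.Str.pyGet? row (k : Int) = PySem.Str.pyGet? f (k : Int)))) := by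
  intro rows
  induction rows with
  | nil => intro m k h; simp [List.getElem?_eq_getElem h]
  | cons row rows ih =>
    intro m k h
    rw [List.foldl_cons]
    have h' : k < (pvStep f m row).length := by rw [pvStep_length]; exact h
    rw [ih (pvStep f m row) k h']
    have hv : (pvStep f m row)[k] =
        (m[k] && decide (PySem.Str.pyGet? row (k : Int) = PySem.Str.pyGet? f (k : Int))) := by
      have := pvStep_getElem? f m row k h
      rw [List.getElem?_eq_getElem h'] at this
      exact Option.some.inj this
    rw [hv, List.all_cons, Bool.and_assoc]

-- the final mask is the column-predicate table over range L
theorem pv_mask_eq (f : String) (rows : List String) (L : Nat) :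
    rows.foldl (pvStep f) (List.replicate L true)
      = (List.range L).map (fun (k : Nat) => rows.all (fun row =>
          decide (PySem.Str.pyGet? row (k : Int) = PySem.Str.pyGet? f (k : Int)))) := by
  apply List.ext_getElem?
  intro k
  by_cases hk : k < L
  · rw [pv_mask_fold f rows (List.replicate L true) k (by simp [hk])]
    have hmap : ((List.range L).map (fun (k : Nat) => rows.all (fun row =>
        decide (PySem.Str.pyGet? row (k : Int) = PySem.Str.pyGet? f (k : Int)))))[k]? =
        some (rows.all (fun row =>
          decide (PySem.Str.pyGet? row (k : Int) = PySem.Str.pyGet? f (k : Int)))) := by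
      rw [List.getElem?_map, List.getElem?_range hk]
      rfl
    rw [hmap, List.getElem_replicate, Bool.true_and]
  · have h1 : (rows.foldl (pvStep f) (List.replicate L true)).length ≤ k := by
      rw [pv_mask_len]; simp; omega
    rw [List.getElem?_eq_none h1, List.getElem?_eq_none (by simp; omega)]

-- B as a countP over the column range
theorem pv_alt_countP (r : String) (rs : List String) :
    getCount1_alt (r :: rs)
      = ((List.range r.toList.length).countP (fun (k : Nat) => rs.all (fun row =>
          decide (PySem.Str.pyGet? row (k : Int) = PySem.Str.pyGet? r (k : Int)))) : Int) := by
  unfold getCount1_alt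
  rw [PySem.List.slice_from_one]
  simp only [List.headD_cons, List.tail_cons]
  rw [pv_mask_eq, List.countP_map]
  rfl

-- ===== VERDICT (by name: the statement is the Claim_ definition above) =====
theorem getCount1_spec : Claim_equal_getCount1 := by
  intro list _ hpre
  unfold Spec_getCount1
  obtain ⟨hne, -⟩ := hpre
  cases list with
  | nil => exact absurd rfl hne
  | cons r rs =>
    cases rs with
    | nil =>
      -- the m == 1 branch of A; B's mask stays all-true and sum(mask) = l
      rw [pv_alt_countP]
      simp only [getCount1, List.headD_cons]
      rw [if_pos (by simp : ((([r] : List String).length : Int)) = 1)]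
      rw [List.countP_eq_length.mpr (fun i _ => by simp)]
      simp
    | cons r2 rs' =>
      simp only [getCount1, List.headD_cons]
      have hm : ¬ (((r :: r2 :: rs').length : Int) = 1) := by simp; omega
      rw [if_neg hm]
      have hlen : ((r :: r2 :: rs').length : Int) - 1 = (((r2 :: rs').length : Nat) : Int) := by
        simp
      rw [hlen]
      rw [pv_outer (fun b i =>
        (PySem.List.pyRange 0 (((r2 :: rs').length : Nat) : Int) 1).foldl
          (fun judge j =>
            if PySem.Str.pyGet? (PySem.List.pyGetD (r :: r2 :: rs') j "") i ≠
               PySem.Str.pyGet? (PySem.List.pyGetD (r :: r2 :: rs') (j + 1) "") i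
            then false else judge) b)]
      simp only [zero_add]
      have h1 : ((PySem.List.pyRange 0 ((r.toList.length : Nat) : Int) 1).countP
          (fun i => (PySem.List.pyRange 0 (((r2 :: rs').length : Nat) : Int) 1).foldl
            (fun judge j =>
              if PySem.Str.pyGet? (PySem.List.pyGetD (r :: r2 :: rs') j "") i ≠
                 PySem.Str.pyGet? (PySem.List.pyGetD (r :: r2 :: rs') (j + 1) "") i
              then false else judge) true))
          = ((PySem.List.pyRange 0 ((r.toList.length : Nat) : Int) 1).countP
            (fun i => decide (∀ s ∈ r :: r2 :: rs',
              PySem.Str.pyGet? s i = PySem.Str.pyGet? r i))) :=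
        List.countP_congr (fun i _ => by rw [pv_col r (r2 :: rs') i])
      rw [h1, PySem.List.pyRange_zero_natCast, List.countP_map, pv_alt_countP]
      congr 1
      apply List.countP_congr
      intro k _
      simp only [Function.comp_apply, decide_eq_true_eq, List.all_eq_true,
        List.forall_mem_cons, true_and]
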